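-- pv_equiv track=rewrite | github.com/GitAmrita/Algo-2024 | MediumAlgo.py | map_difficulty_with_profit
-- ===== SOURCE A (Python) =====
-- def map_difficulty_with_profit(zipped):
--     dp_map = {}
--     for difficulty, profit in zipped:
--         if difficulty not in dp_map.keys():
--            dp_map[difficulty] = profit
--         else:
--             dval = dp_map[difficulty]
--             dp_map[difficulty] = max(dval, profit)
--     return dp_map
-- ===== SOURCE B (Python) =====
-- def map_difficulty_with_profit(zipped):
--     groups = {}
--     for difficulty, profit in zipped:
--         groups.setdefault(difficulty, []).append(profit)
--     return {difficulty: max(profits) for difficulty, profits in groups.items()}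
-- ===== Notes on version B (the rewrite author's own statement) =====
-- stated objective: alternative
-- what changed: Replaces A's single loop with an inline running max by a two-pass group-then-reduce: one pass groups profits per difficulty (setdefault), a dict comprehension then maps each difficulty to max of its group.
import Mathlib
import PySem

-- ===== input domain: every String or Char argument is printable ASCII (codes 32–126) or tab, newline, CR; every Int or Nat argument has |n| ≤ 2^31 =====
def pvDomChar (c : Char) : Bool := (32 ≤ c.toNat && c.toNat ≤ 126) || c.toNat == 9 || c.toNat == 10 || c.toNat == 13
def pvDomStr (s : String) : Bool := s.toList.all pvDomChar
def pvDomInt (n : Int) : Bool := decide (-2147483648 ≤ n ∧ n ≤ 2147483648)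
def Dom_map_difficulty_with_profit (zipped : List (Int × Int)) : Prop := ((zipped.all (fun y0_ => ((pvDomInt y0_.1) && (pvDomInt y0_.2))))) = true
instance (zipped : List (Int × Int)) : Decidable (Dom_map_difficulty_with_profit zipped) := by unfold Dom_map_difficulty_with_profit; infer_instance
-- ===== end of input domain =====

-- B replaces A's single loop with an inline running max by two passes: group profits per difficulty, then map each difficulty to the max of its group (alternative decomposition, same cost).


-- ===== PORT A =====
-- one step of A's loop: first-time keys are inserted, repeats take max(old, new)
def pvStepA (d : PySem.Dict Int Int) (p : Int × Int) : PySem.Dict Int Int :=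
  if d.contains p.1 = false then d.insert p.1 p.2
  else
    let dval := (d.get? p.1).getD 0   -- dp_map[difficulty]: the lookup always hits here (contains holds), so getD's default is never used
    d.insert p.1 (max dval p.2)

def map_difficulty_with_profit (zipped : List (Int × Int)) : List (Int × Int) :=
  (zipped.foldl pvStepA PySem.Dict.empty).items

-- ===== PORT B =====
def pvGroups (zipped : List (Int × Int)) : PySem.Dict Int (List Int) :=
  zipped.foldl (fun g p => g.modify p.1 [] (· ++ [p.2])) PySem.Dict.empty

def map_difficulty_with_profit_alt (zipped : List (Int × Int)) : List (Int × Int) :=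
  (pvGroups zipped).items.map (fun kv => (kv.1, (PySem.List.max? kv.2 (fun y => y)).getD 0))
  -- max(profits): each group is nonempty, so max?'s getD default is never used

-- ===== PRECONDITION & SPEC =====
def Spec_map_difficulty_with_profit (zipped : List (Int × Int)) (out : List (Int × Int)) : Prop := out = map_difficulty_with_profit_alt zipped
instance (zipped : List (Int × Int)) (out : List (Int × Int)) : Decidable (Spec_map_difficulty_with_profit zipped out) := by unfold Spec_map_difficulty_with_profit; infer_instance

-- ===== CLAIM (what is proved, stated in full; the proofs are below) =====
def Claim_equal_map_difficulty_with_profit : Prop := ∀ (zipped : List (Int × Int)), Dom_map_difficulty_with_profit zipped → Spec_map_difficulty_with_profit zipped (map_difficulty_with_profit zipped)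

-- ===== LEMMAS AND PROOFS =====

-- A's step written as a single insert whose value is an if-expression
def pvValA (d : PySem.Dict Int Int) (p : Int × Int) : Int :=
  if d.contains p.1 = false then p.2 else max ((d.get? p.1).getD 0) p.2

theorem pvStepA_eq (d : PySem.Dict Int Int) (p : Int × Int) :
    pvStepA d p = d.insert p.1 (pvValA d p) := by
  unfold pvStepA pvValA; split_ifs <;> rfl

theorem pvFoldA_eq (l : List (Int × Int)) (d : PySem.Dict Int Int) :
    l.foldl pvStepA d = l.foldl (fun d p => d.insert p.1 (pvValA d p)) d := by
  induction l generalizing d with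
  | nil => rfl
  | cons a t ih => simp only [List.foldl_cons, pvStepA_eq, ih]

-- running max in Option form: pvMfold o ps folds the profits ps into the optional running max o
def pvMfold (o : Option Int) (ps : List Int) : Option Int :=
  ps.foldl (fun acc p => some (match acc with | none => p | some v => max v p)) o

theorem pvMfold_some (v : Int) (ps : List Int) : pvMfold (some v) ps = some (ps.foldl max v) := by
  induction ps generalizing v with
  | nil => rfl
  | cons a t ih => simpa [pvMfold, List.foldl] using ih (max v a)

-- what A's loop holds at key k: the running max of the profits filed under k so far
theorem pvA_get? (l : List (Int × Int)) (d : PySem.Dict Int Int) (k : Int) :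
    (l.foldl pvStepA d).get? k = pvMfold (d.get? k) ((l.filter (fun p => p.1 == k)).map (·.2)) := by
  induction l generalizing d with
  | nil => rfl
  | cons a t ih =>
    simp only [List.foldl_cons, ih]
    by_cases hk : a.1 = k
    · rw [pvStepA_eq]
      have h1 : (d.insert a.1 (pvValA d a)).get? k = some (pvValA d a) := by
        rw [hk] at *; exact PySem.Dict.get?_insert_self d k _
      rw [h1]
      have hfilter : (a :: t).filter (fun p => p.1 == k) = a :: t.filter (fun p => p.1 == k) := by
        simp [hk]
      rw [hfilter]
      unfold pvValA
      rw [PySem.Dict.contains_eq_isSome_get?, hk]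
      cases h : d.get? k with
      | none => simp [pvMfold]
      | some v => simp [pvMfold]
    · rw [pvStepA_eq, PySem.Dict.get?_insert, if_neg (Ne.symm hk)]
      have hfilter : (a :: t).filter (fun p => p.1 == k) = t.filter (fun p => p.1 == k) := by
        simp [hk]
      rw [hfilter]

-- ===== VERDICT (by name: the statement is the Claim_ definition above) =====
theorem map_difficulty_with_profit_spec : Claim_equal_map_difficulty_with_profit := by
  intro zipped _
  unfold Spec_map_difficulty_with_profit map_difficulty_with_profit map_difficulty_with_profit_alt
  unfold pvGroups
  set dA := zipped.foldl pvStepA PySem.Dict.empty with hdA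
  set dB := zipped.foldl (fun g p => g.modify p.1 [] (· ++ [p.2])) PySem.Dict.empty with hdB
  have hkeysA : dA.keys = PySem.Set.update (PySem.Dict.empty : PySem.Dict Int Int).keys (zipped.map (·.1)) := by
    rw [hdA, pvFoldA_eq]
    exact PySem.Dict.keys_foldl_insert_key zipped (·.1) _ PySem.Dict.empty
  have hkeysB : dB.keys = PySem.Set.update (PySem.Dict.empty : PySem.Dict Int (List Int)).keys (zipped.map (·.1)) :=
    PySem.Dict.keys_foldl_modify_key zipped (·.1) _ _ PySem.Dict.empty
  have hndA : dA.keys.Nodup := by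
    rw [hdA, pvFoldA_eq]
    exact PySem.Dict.nodup_keys_foldl_insert_key zipped (·.1) _ PySem.Dict.empty PySem.Dict.nodup_keys_empty
  have hndB : dB.keys.Nodup :=
    PySem.Dict.nodup_keys_foldl_modify_key zipped (·.1) _ _ PySem.Dict.empty PySem.Dict.nodup_keys_empty
  rw [PySem.Dict.items_eq_map_keys dA hndA 0, PySem.Dict.items_eq_map_keys dB hndB [],
      List.map_map, hkeysA, hkeysB, PySem.Dict.keys_empty]
  apply List.map_congr_left
  intro k hk
  have hkmem : k ∈ zipped.map (·.1) := by
    rcases (PySem.Set.mem_update _ _ _).1 hk with h | h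
    · simp at h
    · exact h
  have hB : dB.getD k [] = (zipped.filter (fun p => p.1 == k)).map (·.2) := by
    rw [hdB, PySem.Dict.getD_foldl_modify_append, PySem.Dict.getD_empty]
    simp
  have hA : dA.get? k = pvMfold none ((zipped.filter (fun p => p.1 == k)).map (·.2)) := by
    rw [hdA, pvA_get? zipped PySem.Dict.empty k, PySem.Dict.get?_empty]
  -- the filtered list is nonempty since k occurs as a key in zipped
  obtain ⟨p, hp, hpk⟩ := List.mem_map.1 hkmem
  have hmem : p ∈ zipped.filter (fun p => p.1 == k) := List.mem_filter.2 ⟨hp, by simp [hpk]⟩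
  have hne : (zipped.filter (fun p => p.1 == k)).map (·.2) ≠ [] := by
    intro hnil
    rw [List.map_eq_nil_iff] at hnil
    rw [hnil] at hmem
    simp at hmem
  cases hps : (zipped.filter (fun p => p.1 == k)).map (·.2) with
  | nil => exact absurd hps hne
  | cons q t =>
    have hAval : dA.get? k = some (t.foldl max q) := by
      rw [hA, hps]
      show pvMfold (some q) t = _
      exact pvMfold_some q t
    have hBval : PySem.List.max? (dB.getD k []) (fun y => y) = some (t.foldl max q) := by
      rw [hB, hps, PySem.List.max?_id_cons]
    have h1 : dA.getD k 0 = List.foldl max q t := by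
      rw [PySem.Dict.getD_eq_get?_getD, hAval, Option.getD_some]
    have h2 : (PySem.List.max? (dB.getD k []) (fun y => y)).getD 0 = List.foldl max q t := by
      rw [hBval, Option.getD_some]
    simp only [Function.comp_apply]
    rw [h1, h2]
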